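-- pv_equiv track=rewrite | github.com/russellnibbelink/cycsv | y.py | cumulative
-- ===== SOURCE A (Python) =====
-- def cumulative(list_by_month):
--     ylist = []
--     i = 0
--     total = 0
--     for elem in list_by_month:
--         total += elem
--         i += 1
--         if i % 12 == 0:
--             ylist.append(total)
--     return ylist
-- ===== SOURCE B (Python) =====
-- def cumulative(list_by_month):
--     ylist = []
--     total = 0
--     for k in range(len(list_by_month) // 12):
--         total += sum(list_by_month[12 * k : 12 * k + 12])
--         ylist.append(total)
--     return ylist
-- ===== Notes on version B (the rewrite author's own statement) =====
-- stated objective: alternative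
-- what changed: B replaces the per-element loop with a modulo counter by iterating over the floor(n/12) complete 12-element blocks, summing each block slice and accumulating the block sums.
import Mathlib
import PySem

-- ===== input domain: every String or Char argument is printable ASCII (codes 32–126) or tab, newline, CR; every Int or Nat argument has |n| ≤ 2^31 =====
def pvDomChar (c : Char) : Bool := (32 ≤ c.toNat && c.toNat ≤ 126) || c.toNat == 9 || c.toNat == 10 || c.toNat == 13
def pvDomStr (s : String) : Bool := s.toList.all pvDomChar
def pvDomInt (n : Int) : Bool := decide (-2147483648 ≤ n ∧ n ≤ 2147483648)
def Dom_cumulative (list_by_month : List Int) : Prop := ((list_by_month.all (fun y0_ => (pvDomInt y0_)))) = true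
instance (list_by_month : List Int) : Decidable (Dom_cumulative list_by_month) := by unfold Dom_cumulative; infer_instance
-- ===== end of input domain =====

-- B iterates over the floor(n/12) complete 12-element blocks (slice sums accumulated) instead of A's per-element loop with a modulo counter; objective: alternative decomposition (no speed claim).


-- ===== PORT A =====
-- step of A's loop: state (i, total, ylist)
def stepA (s : Int × Int × List Int) (elem : Int) : Int × Int × List Int :=
  let total := s.2.1 + elem
  let i := s.1 + 1
  (i, total, if i % 12 == 0 then s.2.2 ++ [total] else s.2.2)

def cumulative (list_by_month : List Int) : List Int :=
  (list_by_month.foldl stepA (0, 0, [])).2.2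

-- ===== PORT B =====
-- step of B's loop: state (total, ylist), k the block index
def stepB (l : List Int) (s : Int × List Int) (k : Int) : Int × List Int :=
  let total := s.1 + (PySem.List.slice l (some (12 * k)) (some (12 * k + 12))).sum
  (total, s.2 ++ [total])

def cumulative_alt (list_by_month : List Int) : List Int :=
  ((PySem.List.pyRange 0 ((list_by_month.length : Int) / 12) 1).foldl
    (stepB list_by_month) (0, [])).2

-- ===== PRECONDITION & SPEC =====
def Spec_cumulative (list_by_month : List Int) (out : List Int) : Prop := out = cumulative_alt list_by_month
instance (list_by_month : List Int) (out : List Int) : Decidable (Spec_cumulative list_by_month out) := by unfold Spec_cumulative; infer_instance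

-- ===== CLAIM (what is proved, stated in full; the proofs are below) =====
def Claim_equal_cumulative : Prop := ∀ (list_by_month : List Int), Dom_cumulative list_by_month → Spec_cumulative list_by_month (cumulative list_by_month)

-- ===== LEMMAS AND PROOFS =====

-- pure description of A's loop output: j elements already seen, t the running total
def outA (j : Nat) (t : Int) : List Int → List Int
  | [] => []
  | e :: l => (if (j + 1) % 12 = 0 then [t + e] else []) ++ outA (j + 1) (t + e) l

-- common spec: running totals after each complete 12-block
def T (t : Int) (l : List Int) : List Int :=
  if 12 ≤ l.length then
    (t + (l.take 12).sum) :: T (t + (l.take 12).sum) (l.drop 12)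
  else []
termination_by l.length
decreasing_by simp; omega

theorem foldA_eq (l : List Int) : ∀ (j : Nat) (t : Int) (ys : List Int),
    (l.foldl stepA ((j : Int), t, ys)).2.2 = ys ++ outA j t l := by
  induction l with
  | nil => intro j t ys; simp [outA]
  | cons e l ih =>
    intro j t ys
    have hcast : ((j : Int) + 1) = ((j + 1 : Nat) : Int) := by push_cast; ring
    by_cases hc : (j + 1) % 12 = 0
    · have hci : ((((j + 1 : Nat) : Int)) % 12 == 0) = true := by
        rw [beq_iff_eq]; omega
      simp only [List.foldl_cons, stepA, hcast, hci, outA, ih, if_pos hc]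
      simp
    · have hci : ((((j + 1 : Nat) : Int)) % 12 == 0) = false := by
        rw [beq_eq_false_iff_ne]; omega
      simp only [List.foldl_cons, stepA, hcast, hci, outA, ih, if_neg hc]
      simp

theorem outA_append (a : List Int) : ∀ (b : List Int) (j : Nat) (t : Int),
    outA j t (a ++ b) = outA j t a ++ outA (j + a.length) (t + a.sum) b := by
  induction a with
  | nil => intro b j t; simp [outA]
  | cons e a ih =>
    intro b j t
    simp only [List.cons_append, outA, ih, List.length_cons, List.sum_cons, List.append_assoc]
    have h1 : j + 1 + a.length = j + (a.length + 1) := by omega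
    have h2 : t + e + a.sum = t + (e + a.sum) := by ring
    rw [h1, h2]

theorem outA_nil (a : List Int) : ∀ (j : Nat) (t : Int),
    (∀ m, m < a.length → (j + 1 + m) % 12 ≠ 0) → outA j t a = [] := by
  induction a with
  | nil => intro j t _; rfl
  | cons e a ih =>
    intro j t h
    have h0 : (j + 1) % 12 ≠ 0 := by
      have := h 0 (by simp); simpa using this
    simp only [outA, if_neg h0, List.nil_append]
    exact ih (j + 1) (t + e) (fun m hm => by
      have := h (m + 1) (by simp; omega)
      omega)

theorem outA_eq_T (l : List Int) (j : Nat) (t : Int) (hj : j % 12 = 0) :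
    outA j t l = T t l := by
  by_cases h : 12 ≤ l.length
  · have h11 : 11 < l.length := by omega
    have hsplit : l = l.take 11 ++ (l[11] :: l.drop 12) := by
      conv_lhs => rw [← List.take_append_drop 11 l]
      rw [List.drop_eq_getElem_cons h11]
    have hlen : (l.take 11).length = 11 := by simp; omega
    have hs12 : (l.take 12).sum = (l.take 11).sum + l[11] := by
      have h12 : l.take 12 = l.take 11 ++ [l[11]] := by
        rw [show (12 : Nat) = 11 + 1 from rfl, List.take_add_one]
        simp [List.getElem?_eq_getElem h11]
      rw [h12, List.sum_append, List.sum_cons, List.sum_nil]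
      ring
    have step1 : outA j t l
        = outA j t (l.take 11) ++ outA (j + 11) (t + (l.take 11).sum) (l[11] :: l.drop 12) := by
      conv_lhs => rw [hsplit]
      rw [outA_append, hlen]
    have hnil : outA j t (l.take 11) = [] := by
      apply outA_nil
      intro m hm
      rw [hlen] at hm
      omega
    have hhit : (j + 11 + 1) % 12 = 0 := by omega
    have hrec := outA_eq_T (l.drop 12) (j + 12) (t + (l.take 12).sum) (by omega)
    rw [step1, hnil, List.nil_append]
    simp only [outA, if_pos hhit]
    rw [T, if_pos h]
    have ht : t + (l.take 11).sum + l[11] = t + (l.take 12).sum := by rw [hs12]; ring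
    have hidx : j + 11 + 1 = j + 12 := by omega
    rw [ht, hidx, hrec]
    simp only [List.singleton_append]
  · rw [T, if_neg h]
    apply outA_nil
    intro m hm hmod
    omega
termination_by l.length
decreasing_by simp; omega

theorem foldB_eq (l : List Int) (d : Nat) : ∀ (k : Nat) (t : Int) (ys : List Int),
    k + d = l.length / 12 →
    (((PySem.List.pyRange (k : Int) ((l.length : Int) / 12) 1).foldl (stepB l) (t, ys)).2
      = ys ++ T t (l.drop (12 * k))) := by
  induction d with
  | zero =>
    intro k t ys hk
    have hcast : ((l.length : Int) / 12) = ((k : Nat) : Int) := by omega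
    rw [hcast, PySem.List.pyRange_one_eq_nil (le_refl _)]
    have hlt : ¬ 12 ≤ (l.drop (12 * k)).length := by simp; omega
    rw [T, if_neg hlt]
    simp
  | succ d ih =>
    intro k t ys hk
    have hklt : (k : Int) < (l.length : Int) / 12 := by omega
    rw [PySem.List.pyRange_one_cons hklt, List.foldl_cons]
    have hslice : PySem.List.slice l (some (12 * (k : Int))) (some (12 * (k : Int) + 12))
        = (l.drop (12 * k)).take 12 := by
      have h1 : (12 * (k : Int)) = ((12 * k : Nat) : Int) := by push_cast; ring
      have h2 : (12 * (k : Int) + 12) = ((12 * k : Nat) : Int) + ((12 : Nat) : Int) := by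
        push_cast; ring
      rw [h2, h1, PySem.List.slice_natCast_add]
    have hstep : stepB l (t, ys) (k : Int)
        = (t + ((l.drop (12 * k)).take 12).sum,
           ys ++ [t + ((l.drop (12 * k)).take 12).sum]) := by
      simp [stepB, hslice]
    rw [hstep]
    have hk1 : ((k : Int) + 1) = (((k + 1 : Nat)) : Int) := by push_cast; ring
    rw [hk1, ih (k + 1) _ _ (by omega)]
    have hge : 12 ≤ (l.drop (12 * k)).length := by simp; omega
    conv_rhs => rw [T, if_pos hge]
    have hdd : (l.drop (12 * k)).drop 12 = l.drop (12 * (k + 1)) := by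
      rw [List.drop_drop]; congr 1
    rw [hdd]
    simp

theorem cumulative_eq_T (l : List Int) : cumulative l = T 0 l := by
  have h0 : ((0 : Nat) : Int) = 0 := rfl
  have := foldA_eq l 0 0 []
  rw [h0] at this
  rw [cumulative, this, List.nil_append, outA_eq_T l 0 0 (by norm_num)]

theorem cumulative_alt_eq_T (l : List Int) : cumulative_alt l = T 0 l := by
  have h0 : ((0 : Nat) : Int) = 0 := rfl
  have := foldB_eq l (l.length / 12) 0 0 [] (by omega)
  rw [h0] at this
  rw [cumulative_alt, this, List.nil_append]
  congr 1

-- ===== VERDICT (by name: the statement is the Claim_ definition above) =====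
theorem cumulative_spec : Claim_equal_cumulative := by
  intro l _
  unfold Spec_cumulative
  rw [cumulative_eq_T, cumulative_alt_eq_T]
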